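-- pv_equiv track=rewrite | github.com/Danny27HA/PaginaClima | api/routers/chat.py | _sanitize_ai
-- ===== SOURCE A (Python) =====
-- def _sanitize_ai(text: str, max_chars: int = 1400) -> str:
--     """Quita repeticiones raras y recorta textos demasiado largos."""
--     if not text:
--         return text
--     lines = [ln.strip() for ln in text.splitlines() if ln.strip()]
--     dedup = []
--     last = None; rep = 0
--     for ln in lines:
--         if ln == last:
--             rep += 1
--             if rep > 2:
--                 continue
--         else:
--             last = ln; rep = 0
--         dedup.append(ln)
--     text2 = "\n".join(dedup)
--     if len(text2) > max_chars:
--         text2 = text2[:max_chars].rstrip() + "…"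
--     return text2
-- ===== SOURCE B (Python) =====
-- def _sanitize_ai(text: str, max_chars: int = 1400) -> str:
--     """Quita repeticiones raras y recorta textos demasiado largos."""
--     if not text:
--         return text
--     lines = [ln.strip() for ln in text.splitlines() if ln.strip()]
--     dedup = [ln for i, ln in enumerate(lines)
--              if i < 3 or not (ln == lines[i - 1] == lines[i - 2] == lines[i - 3])]
--     text2 = "\n".join(dedup)
--     if len(text2) > max_chars:
--         text2 = text2[:max_chars].rstrip() + "…"
--     return text2
-- ===== Notes on version B (the rewrite author's own statement) =====
-- stated objective: alternative
-- what changed: Replaces the stateful last/rep counter loop with a stateless index-window comprehension: a line is kept iff it is not the fourth (or later) member of a run, checked by comparing it with the three preceding lines.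
import Mathlib
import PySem

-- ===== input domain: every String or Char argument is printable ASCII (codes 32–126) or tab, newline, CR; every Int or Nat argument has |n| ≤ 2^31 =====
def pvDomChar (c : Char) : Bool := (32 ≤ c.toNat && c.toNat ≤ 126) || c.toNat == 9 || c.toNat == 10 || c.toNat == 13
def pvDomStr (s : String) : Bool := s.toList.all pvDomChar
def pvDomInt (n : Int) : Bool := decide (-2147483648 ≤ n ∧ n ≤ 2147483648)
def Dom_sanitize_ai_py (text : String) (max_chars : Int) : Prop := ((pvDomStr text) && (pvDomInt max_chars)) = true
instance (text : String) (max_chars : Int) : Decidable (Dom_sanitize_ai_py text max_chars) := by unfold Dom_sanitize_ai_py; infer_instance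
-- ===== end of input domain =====

-- B replaces A's stateful last/rep counter loop by a stateless index-window filter
-- (keep a line iff it does not equal each of the three preceding lines); objective: alternative.

-- ===== PORT A =====
-- A's loop body: state (dedup, last, rep)
def pvStepA (st : List String × Option String × Int) (ln : String) :
    List String × Option String × Int :=
  match st with
  | (dedup, last, rep) =>
    if some ln = last then
      let rep := rep + 1
      if rep > 2 then (dedup, last, rep) else (dedup ++ [ln], last, rep)
    else (dedup ++ [ln], some ln, 0)

def sanitize_ai_py (text : String) (max_chars : Int) : String :=
  if text = "" then text
  else
    let lines := ((PySem.Str.splitlines text).filter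
        (fun ln => PySem.Str.strip ln ≠ "")).map PySem.Str.strip
    let dedup := (lines.foldl pvStepA ([], none, 0)).1
    let text2 := PySem.Str.join "\n" dedup
    if PySem.Str.len text2 > max_chars then
      PySem.Str.rstrip (PySem.Str.slice text2 none (some max_chars)) ++ "…"
    else text2

-- ===== PORT B =====
-- B's filter condition: i < 3 or not (ln == lines[i-1] == lines[i-2] == lines[i-3])
def pvKeepB (lines : List String) (p : Int × String) : Bool :=
  decide (p.1 < 3) ||
    !(p.2 == PySem.List.pyGetD lines (p.1 - 1) "" &&
      PySem.List.pyGetD lines (p.1 - 1) "" == PySem.List.pyGetD lines (p.1 - 2) "" &&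
      PySem.List.pyGetD lines (p.1 - 2) "" == PySem.List.pyGetD lines (p.1 - 3) "")

def sanitize_ai_py_alt (text : String) (max_chars : Int) : String :=
  if text = "" then text
  else
    let lines := ((PySem.Str.splitlines text).filter
        (fun ln => PySem.Str.strip ln ≠ "")).map PySem.Str.strip
    let dedup := ((PySem.List.enumerate lines 0).filter (pvKeepB lines)).map (·.2)
    let text2 := PySem.Str.join "\n" dedup
    if PySem.Str.len text2 > max_chars then
      PySem.Str.rstrip (PySem.Str.slice text2 none (some max_chars)) ++ "…"
    else text2

-- ===== PRECONDITION & SPEC =====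
def Spec_sanitize_ai_py (text : String) (max_chars : Int) (out : String) : Prop := out = sanitize_ai_py_alt text max_chars
instance (text : String) (max_chars : Int) (out : String) : Decidable (Spec_sanitize_ai_py text max_chars out) := by unfold Spec_sanitize_ai_py; infer_instance

-- ===== CLAIM (what is proved, stated in full; the proofs are below) =====
def Claim_equal_sanitize_ai_py : Prop := ∀ (text : String) (max_chars : Int), Dom_sanitize_ai_py text max_chars → Spec_sanitize_ai_py text max_chars (sanitize_ai_py text max_chars)

-- ===== LEMMAS AND PROOFS =====

-- intermediate spec: prev = already-processed lines in reverse; keep x unless the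
-- previous three lines all equal x
def pvKeep3 (prev s : List String) : List String :=
  match s with
  | [] => []
  | x :: xs =>
      (if prev.take 3 = [x, x, x] then [] else [x]) ++ pvKeep3 (x :: prev) xs

-- A's rep counter = number of adjacent equal pairs at the head of prev
def pvCount (prev : List String) : Nat :=
  match prev with
  | x :: y :: ys => if x = y then 1 + pvCount (y :: ys) else 0
  | _ => 0

theorem pvCount_gt_iff (x : String) (prev : List String) :
    (2 < pvCount (x :: prev)) ↔ prev.take 3 = [x, x, x] := by
  rcases prev with _ | ⟨a, _ | ⟨b, _ | ⟨c, t⟩⟩⟩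
  · simp [pvCount]
  · by_cases h : x = a <;> simp [pvCount, h]
  · by_cases h : x = a <;> by_cases h' : a = b <;> try simp_all [pvCount]
  · by_cases h : x = a <;> by_cases h' : a = b <;> by_cases h'' : b = c <;>
      (try simp_all [pvCount]) <;> (try omega) <;> (intros; subst_vars; simp_all [eq_comm])

theorem pvFoldA_eq_keep3 (s : List String) :
    ∀ (prev dedup : List String),
      (s.foldl pvStepA (dedup, prev.head?, (pvCount prev : Int))).1
        = dedup ++ pvKeep3 prev s := by
  induction s with
  | nil => intro prev dedup; simp [pvKeep3]
  | cons x xs ih =>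
      intro prev dedup
      match prev with
      | [] =>
          simp only [List.foldl_cons, pvStepA, List.head?_nil, reduceCtorEq, if_false]
          simpa [pvKeep3, pvCount] using ih [x] (dedup ++ [x])
      | y :: ys =>
          by_cases h : x = y
          · subst h
            have hrec : pvCount (x :: x :: ys) = 1 + pvCount (x :: ys) := by simp [pvCount]
            have hrep : ((pvCount (x :: ys) : Int) + 1) = (pvCount (x :: x :: ys) : Int) := by
              rw [hrec]; push_cast; ring
            simp only [List.foldl_cons, pvStepA, List.head?_cons, if_true]
            by_cases hgt : ((pvCount (x :: ys) : Int) + 1) > 2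
            · have h3 : (x :: ys).take 3 = [x, x, x] := by
                refine (pvCount_gt_iff x (x :: ys)).1 ?_; omega
              rw [if_pos hgt, hrep]
              have := ih (x :: x :: ys) dedup
              rw [List.head?_cons] at this
              rw [this]
              simp only [pvKeep3, if_pos h3, List.nil_append]
            · have h3 : ¬ (x :: ys).take 3 = [x, x, x] := by
                intro hh
                have h2 := (pvCount_gt_iff x (x :: ys)).2 hh
                omega
              rw [if_neg hgt, hrep]
              have := ih (x :: x :: ys) (dedup ++ [x])
              rw [List.head?_cons] at this
              rw [this]
              simp only [pvKeep3, if_neg h3, List.append_assoc, List.singleton_append]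
          · have h3 : ¬ (y :: ys).take 3 = [x, x, x] := by
              intro hh
              have : y = x := by
                cases ys with
                | nil => simp at hh
                | cons a t => cases t <;> simp_all
              exact h this.symm
            have hcnt : pvCount (x :: y :: ys) = 0 := by simp [pvCount, h]
            simp only [List.foldl_cons, pvStepA, List.head?_cons]
            rw [if_neg (by simpa using h)]
            have := ih (x :: y :: ys) (dedup ++ [x])
            rw [List.head?_cons] at this
            simp only [hcnt, Nat.cast_zero] at this
            rw [this]
            simp only [pvKeep3, if_neg h3, List.append_assoc, List.singleton_append]

theorem pyGetD_rev (p rest : List String) (k : Nat) (hk1 : 1 ≤ k) (hk : k ≤ p.length) :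
    PySem.List.pyGetD (p.reverse ++ rest) ((p.length : Int) - k) "" = p.getD (k - 1) "" := by
  have h1 : ((p.length : Int) - k) = ((p.length - k : Nat) : Int) := by push_cast [hk]; omega
  rw [h1, PySem.List.pyGetD_natCast]
  rw [List.getD_eq_getElem?_getD, List.getD_eq_getElem?_getD]
  rw [List.getElem?_append_left (by simp; omega)]
  rw [List.getElem?_reverse (by simp; omega)]
  congr 2
  omega
theorem pvBeq3 (x a b c : String) :
    (x == a && a == b && b == c) = decide ([a, b, c] = [x, x, x]) := by
  by_cases e1 : x = a <;> by_cases e2 : a = b <;> by_cases e3 : b = c <;>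
    subst_vars <;> (try simp_all) <;>
      (apply Bool.eq_iff_iff.mpr;
       simp only [Bool.and_eq_true, beq_iff_eq, decide_eq_true_eq];
       constructor <;> intro hh <;> simp_all)
theorem pvKeepB_char (prev s : List String) (x : String) :
    pvKeepB (prev.reverse ++ x :: s) ((prev.length : Int), x)
      = !decide (prev.take 3 = [x, x, x]) := by
  match prev with
  | [] => simp [pvKeepB]
  | [a] => simp [pvKeepB]
  | [a, b] => simp [pvKeepB]
  | a :: b :: c :: t =>
    have g1 := pyGetD_rev (a :: b :: c :: t) (x :: s) 1 (by omega) (by simp)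
    have g2 := pyGetD_rev (a :: b :: c :: t) (x :: s) 2 (by omega) (by simp)
    have g3 := pyGetD_rev (a :: b :: c :: t) (x :: s) 3 (by omega) (by simp)
    push_cast at g1 g2 g3
    have hlt : decide ((((a :: b :: c :: t).length : Nat) : Int) < 3) = false :=
      decide_eq_false (by simp only [List.length_cons]; push_cast; omega)
    simp only [pvKeepB]
    rw [g1, g2, g3]
    rw [show (a :: b :: c :: t).getD 0 "" = a from rfl,
        show (a :: b :: c :: t).getD 1 "" = b from rfl,
        show (a :: b :: c :: t).getD 2 "" = c from rfl,
        show List.take 3 (a :: b :: c :: t) = [a, b, c] from rfl]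
    rw [hlt, Bool.false_or]
    exact congrArg Bool.not (pvBeq3 x a b c)

theorem pvFilterB_eq_keep3 (s : List String) :
    ∀ (prev lines : List String), lines = prev.reverse ++ s →
      ((PySem.List.enumerate s (prev.length : Int)).filter (pvKeepB lines)).map (·.2)
        = pvKeep3 prev s := by
  induction s with
  | nil => intro prev lines _; simp [PySem.List.enumerate_nil, pvKeep3]
  | cons x xs ih =>
      intro prev lines hl
      rw [PySem.List.enumerate_cons]
      subst hl
      have hnext := ih (x :: prev) (prev.reverse ++ x :: xs) (by simp)
      have hlen : ((x :: prev).length : Int) = (prev.length : Int) + 1 := by simp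
      rw [hlen] at hnext
      rw [List.filter_cons]
      rw [pvKeepB_char prev xs x]
      by_cases h3 : prev.take 3 = [x, x, x]
      · simp [h3, pvKeep3, hnext]
      · simp [h3, pvKeep3, hnext]

theorem pvDedup_eq (lines : List String) :
    (lines.foldl pvStepA ([], none, 0)).1
      = ((PySem.List.enumerate lines 0).filter (pvKeepB lines)).map (·.2) := by
  have hA := pvFoldA_eq_keep3 lines [] []
  have hB := pvFilterB_eq_keep3 lines [] lines (by simp)
  simp only [List.head?_nil, pvCount, Nat.cast_zero, List.length_nil] at hA hB
  rw [hA, hB]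
  simp

-- ===== VERDICT (by name: the statement is the Claim_ definition above) =====
theorem sanitize_ai_py_spec : Claim_equal_sanitize_ai_py := by
  intro text max_chars _
  unfold Spec_sanitize_ai_py sanitize_ai_py sanitize_ai_py_alt
  by_cases h : text = ""
  · simp [h]
  · simp only [h]
    rw [pvDedup_eq]
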